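-- pv_equiv track=rewrite | github.com/Abhisheklatoriya/blank-app | FileMatcher.py | find_html_entry
-- ===== SOURCE A (Python) =====
-- def normalize_zip_path(path: str) -> str:
--     return path.replace("\\", "/").lstrip("./")
--
-- def find_html_entry(zip_names):
--     preferred = ["index.html", "index.htm"]
--     normalized = [normalize_zip_path(n) for n in zip_names]
--
--     for pref in preferred:
--         for name in normalized:
--             if name.lower().endswith("/" + pref) or name.lower() == pref:
--                 return name
--
--     html_files = [n for n in normalized if n.lower().endswith((".html", ".htm"))]
--     return html_files[0] if html_files else None
-- ===== SOURCE B (Python) =====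
-- def normalize_zip_path(path: str) -> str:
--     return path.replace("\\", "/").lstrip("./")
--
-- def find_html_entry(zip_names):
--     # Single pass over the normalized names: rank each one (0 = index.html,
--     # 1 = index.htm, 2 = other .html/.htm) and keep the first name of the
--     # lowest rank seen, returning immediately on a rank-0 hit.
--     normalized = [normalize_zip_path(n) for n in zip_names]
--     best = None  # (rank, name)
--     for name in normalized:
--         low = name.lower()
--         if low.endswith("/index.html") or low == "index.html":
--             return name
--         elif low.endswith("/index.htm") or low == "index.htm":
--             rank = 1
--         elif low.endswith(".html") or low.endswith(".htm"):
--             rank = 2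
--         else:
--             continue
--         if best is None or rank < best[0]:
--             best = (rank, name)
--     return None if best is None else best[1]
-- ===== Notes on version B (the rewrite author's own statement) =====
-- stated objective: simpler
-- what changed: Replaces A's three separate scans over the normalized list (one per preferred name, then a filter for any .html/.htm) with a single pass that ranks each name (0/1/2) and keeps the first name of the lowest rank, returning immediately on a rank-0 hit.
import Mathlib
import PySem

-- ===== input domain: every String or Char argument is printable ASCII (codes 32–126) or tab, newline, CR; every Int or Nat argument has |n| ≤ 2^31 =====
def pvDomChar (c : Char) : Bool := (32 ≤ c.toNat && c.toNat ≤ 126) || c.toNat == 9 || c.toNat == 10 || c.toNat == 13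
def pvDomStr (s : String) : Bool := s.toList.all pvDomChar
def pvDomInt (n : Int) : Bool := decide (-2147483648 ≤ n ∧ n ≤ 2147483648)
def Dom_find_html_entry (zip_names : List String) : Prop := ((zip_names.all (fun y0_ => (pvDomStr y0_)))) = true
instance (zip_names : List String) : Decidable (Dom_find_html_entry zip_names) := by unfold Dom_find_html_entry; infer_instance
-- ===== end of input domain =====

-- ===== PORT A =====
-- B replaces A's three separate scans with one ranked pass over the normalized names; objective: simpler.
-- shared helper (both Pythons use the identical normalize_zip_path):
-- 'lstrip("./")' is ported by hand as dropWhile over the char set {'.', '/'} — exact for Python's str.lstrip(chars)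
def pvNormalize (path : String) : String :=
  String.ofList ((PySem.Str.replace path "\\" "/").toList.dropWhile (fun c => c == '.' || c == '/'))

def pvFindPref : List String → List String → Option String
  | [], _ => none
  | pref :: rest, normalized =>
    match normalized.find? (fun name =>
        PySem.Str.endswith (PySem.Str.lower name) ("/" ++ pref) || PySem.Str.lower name == pref) with
    | some n => some n
    | none => pvFindPref rest normalized

def find_html_entry (zip_names : List String) : Option String :=
  let normalized := zip_names.map pvNormalize
  match pvFindPref ["index.html", "index.htm"] normalized with
  | some n => some n
  | none =>
    let html_files := normalized.filter (fun n =>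
      PySem.Str.endswith (PySem.Str.lower n) ".html" || PySem.Str.endswith (PySem.Str.lower n) ".htm")
    html_files.head?

-- ===== PORT B =====
-- the single ranked pass of Source B, over the already-normalized names, carrying best = (rank, name)
def pvBestPass : List String → Option (Nat × String) → Option String
  | [], best => best.map (·.2)
  | name :: rest, best =>
    let low := PySem.Str.lower name
    if PySem.Str.endswith low "/index.html" || low == "index.html" then some name
    else
      match (if PySem.Str.endswith low "/index.htm" || low == "index.htm" then some 1
             else if PySem.Str.endswith low ".html" || PySem.Str.endswith low ".htm" then some 2
             else none : Option Nat) with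
      | none => pvBestPass rest best
      | some rank =>
        match best with
        | none => pvBestPass rest (some (rank, name))
        | some b => if rank < b.1 then pvBestPass rest (some (rank, name)) else pvBestPass rest best

def find_html_entry_alt (zip_names : List String) : Option String :=
  pvBestPass (zip_names.map pvNormalize) none

-- ===== PRECONDITION & SPEC =====
def Spec_find_html_entry (zip_names : List String) (out : Option String) : Prop := out = find_html_entry_alt zip_names
instance (zip_names : List String) (out : Option String) : Decidable (Spec_find_html_entry zip_names out) := by unfold Spec_find_html_entry; infer_instance

-- ===== CLAIM (what is proved, stated in full; the proofs are below) =====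
def Claim_equal_find_html_entry : Prop := ∀ (zip_names : List String), Dom_find_html_entry zip_names → Spec_find_html_entry zip_names (find_html_entry zip_names)

-- ===== LEMMAS AND PROOFS =====
-- the three match predicates on a normalized name
def pvP0 (n : String) : Bool :=
  PySem.Str.endswith (PySem.Str.lower n) "/index.html" || PySem.Str.lower n == "index.html"
def pvP1 (n : String) : Bool :=
  PySem.Str.endswith (PySem.Str.lower n) "/index.htm" || PySem.Str.lower n == "index.htm"
def pvP2 (n : String) : Bool :=
  PySem.Str.endswith (PySem.Str.lower n) ".html" || PySem.Str.endswith (PySem.Str.lower n) ".htm"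

lemma pvP0_eq (n : String) :
    (PySem.Str.endswith (PySem.Str.lower n) "/index.html" || PySem.Str.lower n == "index.html") = pvP0 n := rfl
lemma pvP1_eq (n : String) :
    (PySem.Str.endswith (PySem.Str.lower n) "/index.htm" || PySem.Str.lower n == "index.htm") = pvP1 n := rfl
lemma pvP2_eq (n : String) :
    (PySem.Str.endswith (PySem.Str.lower n) ".html" || PySem.Str.endswith (PySem.Str.lower n) ".htm") = pvP2 n := rfl

-- A's result, flattened into the three predicate scans
lemma pvA_eq (zip_names : List String) :
    find_html_entry zip_names =
      (match (zip_names.map pvNormalize).find? pvP0 with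
       | some n => some n
       | none =>
         match (zip_names.map pvNormalize).find? pvP1 with
         | some n => some n
         | none => ((zip_names.map pvNormalize).filter pvP2).head?) := by
  have hf0 : (fun name => PySem.Str.endswith (PySem.Str.lower name) ("/" ++ "index.html")
      || PySem.Str.lower name == "index.html") = pvP0 := rfl
  have hf1 : (fun name => PySem.Str.endswith (PySem.Str.lower name) ("/" ++ "index.htm")
      || PySem.Str.lower name == "index.htm") = pvP1 := rfl
  have hf2 : (fun n => PySem.Str.endswith (PySem.Str.lower n) ".html"
      || PySem.Str.endswith (PySem.Str.lower n) ".htm") = pvP2 := rfl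
  show (match pvFindPref ["index.html", "index.htm"] (zip_names.map pvNormalize) with
        | some n => some n
        | none => ((zip_names.map pvNormalize).filter
            (fun n => PySem.Str.endswith (PySem.Str.lower n) ".html"
              || PySem.Str.endswith (PySem.Str.lower n) ".htm")).head?) = _
  simp only [pvFindPref, hf0, hf1, hf2]
  cases h0 : (zip_names.map pvNormalize).find? pvP0 with
  | some n => simp
  | none => cases h1 : (zip_names.map pvNormalize).find? pvP1 <;> simp [pvFindPref]

-- the value B's pass computes, as a function of the remaining names and the carried best
def pvRes (N : List String) (best : Option (Nat × String)) : Option String :=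
  match N.find? pvP0 with
  | some n => some n
  | none =>
    match best with
    | some (1, b) => some b
    | _ =>
      match N.find? pvP1 with
      | some n => some n
      | none =>
        match best with
        | some b => some b.2
        | none => (N.filter pvP2).head?

-- invariant of B's pass: ranks stored in `best` are 1 or 2, and the answer is
-- "first p0 hit, else a rank-1 best, else first p1 hit, else any best, else first p2 hit"
lemma pvBestPass_spec (N : List String) (best : Option (Nat × String))
    (hb : ∀ b, best = some b → b.1 = 1 ∨ b.1 = 2) :
    pvBestPass N best = pvRes N best := by
  induction N generalizing best with
  | nil =>
    match best with
    | none => rfl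
    | some (0, b) => exact absurd (hb _ rfl) (by simp)
    | some (1, b) => rfl
    | some (2, b) => rfl
    | some (r + 3, b) => exact absurd (hb _ rfl) (by simp)
  | cons n rest ih =>
    rw [pvBestPass]
    simp only [pvP0_eq, pvP1_eq, pvP2_eq]
    cases h0 : pvP0 n with
    | true => simp [pvRes, List.find?_cons, h0]
    | false =>
      simp only [Bool.false_eq_true, if_false, reduceIte]
      cases h1 : pvP1 n with
      | true =>
        simp only [if_true, reduceIte]
        match best with
        | none =>
          rw [ih (some (1, n)) (by rintro b hb0; cases hb0; left; rfl)]
          simp [pvRes, List.find?_cons, h0, h1]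
        | some (0, b) => exact absurd (hb _ rfl) (by simp)
        | some (1, b) =>
          simp only [show ¬ ((1 : Nat) < 1) from by omega, if_false, reduceIte]
          rw [ih (some (1, b)) (by rintro b hb0; cases hb0; left; rfl)]
          simp [pvRes, List.find?_cons, h0, h1]
        | some (2, b) =>
          simp only [show ((1 : Nat) < 2) from by omega, if_true, reduceIte]
          rw [ih (some (1, n)) (by rintro b hb0; cases hb0; left; rfl)]
          simp [pvRes, List.find?_cons, h0, h1]
        | some (r + 3, b) => exact absurd (hb _ rfl) (by simp)
      | false =>
        simp only [Bool.false_eq_true, if_false, reduceIte]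
        rcases Bool.eq_false_or_eq_true (pvP2 n) with h2 | h2
        · -- pvP2 n = true: rank 2
          simp only [h2, if_true, reduceIte]
          match best with
          | none =>
            rw [ih (some (2, n)) (by rintro b hb0; cases hb0; right; rfl)]
            simp [pvRes, List.find?_cons, h0, h1, List.filter_cons, h2]
          | some (0, b) => exact absurd (hb _ rfl) (by simp)
          | some (1, b) =>
            simp only [show ¬ ((2 : Nat) < 1) from by omega, if_false, reduceIte]
            rw [ih (some (1, b)) (by rintro b hb0; cases hb0; left; rfl)]
            simp [pvRes, List.find?_cons, h0, h1]
          | some (2, b) =>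
            simp only [show ¬ ((2 : Nat) < 2) from by omega, if_false, reduceIte]
            rw [ih (some (2, b)) (by rintro b hb0; cases hb0; right; rfl)]
            simp [pvRes, List.find?_cons, h0, h1]
          | some (r + 3, b) => exact absurd (hb _ rfl) (by simp)
        · -- pvP2 n = false: no match, skip
          simp only [h2, Bool.false_eq_true, if_false, reduceIte]
          rw [ih best hb]
          simp [pvRes, List.find?_cons, h0, h1, List.filter_cons, h2]

-- ===== VERDICT (by name: the statement is the Claim_ definition above) =====
theorem find_html_entry_spec : Claim_equal_find_html_entry := by
  intro zip_names _
  show find_html_entry zip_names = find_html_entry_alt zip_names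
  rw [pvA_eq, find_html_entry_alt, pvBestPass_spec _ none (by rintro b ⟨⟩)]
  rfl
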